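-- pv_equiv track=rewrite | github.com/qxu/warframe_ss | market.py | find_drop_item
-- ===== SOURCE A (Python) =====
-- DROP_ITEM_NAME_MAP = {
--     'Kavasa Prime Kubrow Collar Blueprint': 'Kavasa Prime Collar Blueprint',
--     'Kavasa Prime Buckle': 'Kavasa Prime Collar Buckle',
--     'Kavasa Prime Band': 'Kavasa Prime Collar Band'
-- }
--
-- def find_drop_item(items, drop_item):
--     # items = items['payload']['items']['en']
--
--     for item in items:
--         if item['item_name'] == drop_item:
--             return item
--
--     if drop_item in DROP_ITEM_NAME_MAP:
--         drop_item = DROP_ITEM_NAME_MAP[drop_item]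
--     elif drop_item.endswith(' Blueprint'):
--         drop_item = drop_item[:-len(' Blueprint')]
--     else:
--         return
--
--     for item in items:
--         if item['item_name'] == drop_item:
--             return item
-- ===== SOURCE B (Python) =====
-- DROP_ITEM_NAME_MAP = {
--     'Kavasa Prime Kubrow Collar Blueprint': 'Kavasa Prime Collar Blueprint',
--     'Kavasa Prime Buckle': 'Kavasa Prime Collar Buckle',
--     'Kavasa Prime Band': 'Kavasa Prime Collar Band'
-- }
--
-- def find_drop_item(items, drop_item):
--     # Resolve the fallback name up front, then make ONE pass over items:
--     # return immediately on a direct name match (direct matches always win,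
--     # since A's whole first scan precedes its second), and remember the first
--     # fallback-name match to return if no direct match exists.
--     if drop_item in DROP_ITEM_NAME_MAP:
--         alt = DROP_ITEM_NAME_MAP[drop_item]
--     elif drop_item.endswith(' Blueprint'):
--         alt = drop_item[:-len(' Blueprint')]
--     else:
--         alt = None
--     fallback = None
--     for item in items:
--         name = item['item_name']
--         if name == drop_item:
--             return item
--         if fallback is None and name == alt:
--             fallback = item
--     return fallback
-- ===== Notes on version B (the rewrite author's own statement) =====
-- stated objective: alternative
-- what changed: Resolves the fallback name up front and replaces A's two staged scans by a single pass with an accumulator: return immediately on a direct match, remember the first fallback-name match, return it (or None) at the end.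
import Mathlib
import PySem

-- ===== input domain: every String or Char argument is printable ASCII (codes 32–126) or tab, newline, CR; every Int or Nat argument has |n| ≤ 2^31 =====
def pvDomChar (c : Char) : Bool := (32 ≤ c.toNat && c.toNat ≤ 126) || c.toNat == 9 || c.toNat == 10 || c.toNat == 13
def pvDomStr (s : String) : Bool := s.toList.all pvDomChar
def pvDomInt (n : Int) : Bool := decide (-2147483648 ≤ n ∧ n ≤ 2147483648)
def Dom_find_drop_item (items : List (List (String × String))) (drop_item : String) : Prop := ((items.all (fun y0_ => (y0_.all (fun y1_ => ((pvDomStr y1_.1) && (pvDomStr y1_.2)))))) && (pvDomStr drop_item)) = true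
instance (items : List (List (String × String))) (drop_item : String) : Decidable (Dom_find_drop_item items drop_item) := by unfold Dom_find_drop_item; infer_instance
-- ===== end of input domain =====

-- B resolves the fallback name first and replaces A's two staged scans by one pass with an accumulator; same cost class, different decomposition. Return value only (no mutation).

-- ===== PORT A =====
-- DROP_ITEM_NAME_MAP
def pvMap : PySem.Dict String String := PySem.Dict.ofList
  [("Kavasa Prime Kubrow Collar Blueprint", "Kavasa Prime Collar Blueprint"),
   ("Kavasa Prime Buckle", "Kavasa Prime Collar Buckle"),
   ("Kavasa Prime Band", "Kavasa Prime Collar Band")]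

-- item['item_name']: exact where the key is present (guaranteed by Pre_); Python raises KeyError otherwise
def pvItemName (item : List (String × String)) : String :=
  ((PySem.Dict.mk item).get? "item_name").getD ""

-- 'for item in items: if item['item_name'] == drop_item: return item'
def pvScanA (items : List (List (String × String))) (name : String) : Option (List (String × String)) :=
  match items with
  | [] => none
  | item :: rest => if pvItemName item == name then some item else pvScanA rest name

def find_drop_item (items : List (List (String × String))) (drop_item : String) : Option (List (String × String)) :=
  match pvScanA items drop_item with
  | some item => some item
  | none =>
    if pvMap.contains drop_item then
      pvScanA items (pvMap.getD drop_item "")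
    else if PySem.Str.endswith drop_item " Blueprint" then
      pvScanA items (PySem.Str.slice drop_item none (some (-10)))
    else none

-- ===== PORT B =====
-- the single loop: return on direct match, remember first fallback match in fb
def pvLoopB (drop_item : String) (alt : Option String) :
    List (List (String × String)) → Option (List (String × String)) → Option (List (String × String))
  | [], fb => fb
  | item :: rest, fb =>
    let name := pvItemName item
    if name == drop_item then some item
    else pvLoopB drop_item alt rest
      (if fb.isNone && (some name == alt) then some item else fb)

def find_drop_item_alt (items : List (List (String × String))) (drop_item : String) : Option (List (String × String)) :=
  let alt : Option String :=
    if pvMap.contains drop_item then some (pvMap.getD drop_item "")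
    else if PySem.Str.endswith drop_item " Blueprint" then some (PySem.Str.slice drop_item none (some (-10)))
    else none
  pvLoopB drop_item alt items none

-- ===== PRECONDITION & SPEC =====
-- Pre_ excludes exactly the inputs where Python A raises KeyError: an item lacking an
-- 'item_name' key that is not preceded by an item whose item_name equals drop_item
-- (both programs return, at that earlier match, before ever touching the keyless item).
def Pre_find_drop_item (items : List (List (String × String))) (drop_item : String) : Prop :=
  (List.range items.length).all (fun i =>
    ((PySem.Dict.mk (items.getD i [])).contains "item_name") ||
    (items.take i).any (fun it => (PySem.Dict.mk it).get? "item_name" == some drop_item)) = true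
instance (items : List (List (String × String))) (drop_item : String) : Decidable (Pre_find_drop_item items drop_item) := by unfold Pre_find_drop_item; infer_instance

def pvWitness_find_drop_item : (List (List (String × String))) × String :=
  ([[("item_name", "Ash Prime Blueprint")]], "Ash Prime Blueprint")

def Spec_find_drop_item (items : List (List (String × String))) (drop_item : String) (out : Option (List (String × String))) : Prop := out = find_drop_item_alt items drop_item
instance (items : List (List (String × String))) (drop_item : String) (out : Option (List (String × String))) : Decidable (Spec_find_drop_item items drop_item out) := by unfold Spec_find_drop_item; infer_instance

-- ===== CLAIM (what is proved, stated in full; the proofs are below) =====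
def Claim_equal_find_drop_item : Prop := ∀ (items : List (List (String × String))) (drop_item : String), Dom_find_drop_item items drop_item → Pre_find_drop_item items drop_item → Spec_find_drop_item items drop_item (find_drop_item items drop_item)

-- ===== LEMMAS AND PROOFS =====

-- The one-pass loop equals: first direct match, else the accumulator, else the first fallback match.
theorem pvLoopB_eq (drop_item : String) (alt : Option String)
    (items : List (List (String × String))) (fb : Option (List (String × String))) :
    pvLoopB drop_item alt items fb
      = match pvScanA items drop_item with
        | some it => some it
        | none => fb.or (alt.bind (fun a => pvScanA items a)) := by
  induction items generalizing fb with
  | nil => cases alt <;> cases fb <;> simp [pvLoopB, pvScanA, Option.or]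
  | cons item rest ih =>
    by_cases hd : pvItemName item == drop_item
    · simp [pvLoopB, pvScanA, hd]
    · cases alt with
      | none => simp [pvLoopB, pvScanA, hd, ih]
      | some a =>
        have hd' : ¬ pvItemName item = drop_item := by simpa using hd
        by_cases ha : pvItemName item = a
        · have hda : ¬ a = drop_item := ha ▸ hd'
          cases fb with
          | none =>
            simp only [pvLoopB, pvScanA, ih]
            cases hs : pvScanA rest drop_item <;> simp [ha, hda, Option.or]
          | some v =>
            simp only [pvLoopB, pvScanA, ih]
            cases hs : pvScanA rest drop_item <;> simp [ha, hda, Option.or]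
        · simp only [pvLoopB, pvScanA, ih]
          cases hs : pvScanA rest drop_item <;> simp [ha, hd', Option.or]

-- ===== VERDICT (by name: the statement is the Claim_ definition above) =====
theorem find_drop_item_spec : Claim_equal_find_drop_item := by
  intro items drop_item _ _
  unfold Spec_find_drop_item find_drop_item find_drop_item_alt
  rw [pvLoopB_eq]
  cases hs : pvScanA items drop_item with
  | some it => rfl
  | none =>
    split_ifs with h1 h2 <;> simp [Option.or]
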